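-- pv_equiv track=rewrite | github.com/scduvv2/Intro-to-ai | session8-2/DocSimilarity.py | compareDocs
-- ===== SOURCE A (Python) =====
-- def compareDocs(Doc1Freq, Doc2Freq):
--
--     # Set storage for the word.
--     TotalDiff = 0
--
--     # Now iterate over the first doc getting counts
--     # for all items in it.
--     for (Word, Count1) in Doc1Freq.items():
--
--         # If it is shared add in the difference.
--         if (Word in Doc2Freq):
--             Count2 = Doc2Freq[Word]
--             TotalDiff += abs(Count1 - Count2)
--
--         # Else we add in the total amount.
--         else: TotalDiff += Count1
--
--     # Now we deal with all the items that are present in 2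
--     # But are not present in 1.  Again we add the total count.
--     for (Word, Count2) in Doc2Freq.items():
--         if (Word not in Doc1Freq):
--             TotalDiff += Count2
--
--     # Finally return the Count.
--     return(TotalDiff)
-- ===== SOURCE B (Python) =====
-- def compareDocs(Doc1Freq, Doc2Freq):
--     # Sum every count once, then correct the shared words:
--     # a shared word should contribute abs(c1 - c2) instead of c1 + c2.
--     TotalDiff = sum(Doc1Freq.values()) + sum(Doc2Freq.values())
--     for Word, Count1 in Doc1Freq.items():
--         Count2 = Doc2Freq.get(Word)
--         if Count2 is not None:
--             TotalDiff += abs(Count1 - Count2) - Count1 - Count2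
--     return TotalDiff
-- ===== Notes on version B (the rewrite author's own statement) =====
-- stated objective: alternative
-- what changed: B replaces A's two sequential filtered scans (branching per word, plus a second pass for Doc2-only words) by summing all counts of both dicts once and then a single correction loop over Doc1 that rewrites each shared word's contribution c1+c2 into abs(c1-c2).
import Mathlib
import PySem

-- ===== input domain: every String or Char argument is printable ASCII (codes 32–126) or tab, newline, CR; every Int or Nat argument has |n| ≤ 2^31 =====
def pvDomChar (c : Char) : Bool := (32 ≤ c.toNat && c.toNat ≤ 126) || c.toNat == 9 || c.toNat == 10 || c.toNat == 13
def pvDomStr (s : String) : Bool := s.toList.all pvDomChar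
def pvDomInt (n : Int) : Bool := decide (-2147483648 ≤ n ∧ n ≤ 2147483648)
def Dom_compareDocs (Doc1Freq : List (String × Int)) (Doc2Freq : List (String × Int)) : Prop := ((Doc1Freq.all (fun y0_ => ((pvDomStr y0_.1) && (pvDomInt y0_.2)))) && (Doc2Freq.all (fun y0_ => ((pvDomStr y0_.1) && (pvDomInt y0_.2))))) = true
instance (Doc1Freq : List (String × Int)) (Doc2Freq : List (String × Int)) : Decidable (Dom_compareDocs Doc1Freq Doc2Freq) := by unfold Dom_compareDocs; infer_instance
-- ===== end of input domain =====

-- B sums all counts of both dicts once, then one correction loop over Doc1 turns each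
-- shared word's c1+c2 into |c1-c2| — replacing A's two filtered scans (alternative decomposition, same cost).


-- ===== PORT A =====
def compareDocs (Doc1Freq : List (String × Int)) (Doc2Freq : List (String × Int)) : Int :=
  let t1 := Doc1Freq.foldl (fun acc p =>
    match (PySem.Dict.mk Doc2Freq).get? p.1 with
    | some c2 => acc + |p.2 - c2|
    | none => acc + p.2) (0 : Int)
  Doc2Freq.foldl (fun acc p =>
    match (PySem.Dict.mk Doc1Freq).get? p.1 with
    | some _ => acc
    | none => acc + p.2) t1

-- ===== PORT B =====
def compareDocs_alt (Doc1Freq : List (String × Int)) (Doc2Freq : List (String × Int)) : Int :=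
  let total := (Doc1Freq.map Prod.snd).sum + (Doc2Freq.map Prod.snd).sum
  Doc1Freq.foldl (fun acc p =>
    match (PySem.Dict.mk Doc2Freq).get? p.1 with
    | some c2 => acc + (|p.2 - c2| - p.2 - c2)
    | none => acc) total

-- ===== PRECONDITION & SPEC =====
-- Pre_ requires both association lists to have pairwise-distinct keys: the Python arguments are
-- dicts, whose keys are necessarily distinct, so no Python input is excluded.
def Pre_compareDocs (Doc1Freq : List (String × Int)) (Doc2Freq : List (String × Int)) : Prop :=
  (Doc1Freq.map Prod.fst).Nodup ∧ (Doc2Freq.map Prod.fst).Nodup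
instance (Doc1Freq : List (String × Int)) (Doc2Freq : List (String × Int)) : Decidable (Pre_compareDocs Doc1Freq Doc2Freq) := by unfold Pre_compareDocs; infer_instance
def pvWitness_compareDocs : (List (String × Int)) × (List (String × Int)) :=
  ([("a", 2), ("c", -1)], [("a", 1), ("b", 3)])

def Spec_compareDocs (Doc1Freq : List (String × Int)) (Doc2Freq : List (String × Int)) (out : Int) : Prop := out = compareDocs_alt Doc1Freq Doc2Freq
instance (Doc1Freq : List (String × Int)) (Doc2Freq : List (String × Int)) (out : Int) : Decidable (Spec_compareDocs Doc1Freq Doc2Freq out) := by unfold Spec_compareDocs; infer_instance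

-- ===== CLAIM (what is proved, stated in full; the proofs are below) =====
def Claim_equal_compareDocs : Prop := ∀ (Doc1Freq : List (String × Int)) (Doc2Freq : List (String × Int)), Dom_compareDocs Doc1Freq Doc2Freq → Pre_compareDocs Doc1Freq Doc2Freq → Spec_compareDocs Doc1Freq Doc2Freq (compareDocs Doc1Freq Doc2Freq)

-- ===== LEMMAS AND PROOFS =====

-- per-pair summands of the two loops of A, of B's loop, and the two cross terms
def gA1 (d2 : List (String × Int)) (p : String × Int) : Int :=
  match (PySem.Dict.mk d2).get? p.1 with
  | some c2 => |p.2 - c2|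
  | none => p.2

def gA2 (d1 : List (String × Int)) (p : String × Int) : Int :=
  match (PySem.Dict.mk d1).get? p.1 with
  | some _ => 0
  | none => p.2

def gB (d2 : List (String × Int)) (p : String × Int) : Int :=
  match (PySem.Dict.mk d2).get? p.1 with
  | some c2 => |p.2 - c2| - p.2 - c2
  | none => 0

def hlk (d2 : List (String × Int)) (p : String × Int) : Int :=
  match (PySem.Dict.mk d2).get? p.1 with
  | some c2 => c2
  | none => 0

def hmem (d1 : List (String × Int)) (p : String × Int) : Int :=
  match (PySem.Dict.mk d1).get? p.1 with
  | some _ => p.2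
  | none => 0

lemma foldl_add_map (g : String × Int → Int) (l : List (String × Int)) (init : Int) :
    l.foldl (fun a p => a + g p) init = init + (l.map g).sum := by
  induction l generalizing init with
  | nil => simp
  | cons x t ih => simp [List.foldl_cons, ih]; ring

lemma sum_indicator (d1 : List (String × Int)) (w : String) (c : Int)
    (hnd : (d1.map Prod.fst).Nodup) :
    (d1.map (fun p => if p.1 = w then c else 0)).sum
      = if w ∈ d1.map Prod.fst then c else 0 := by
  induction d1 with
  | nil => simp
  | cons x t ih =>
    simp only [List.map_cons, List.nodup_cons] at hnd ⊢
    rw [List.sum_cons, ih hnd.2]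
    by_cases hx : x.1 = w
    · subst hx
      simp [hnd.1]
    · have hw : ¬ w = x.1 := fun h => hx h.symm
      by_cases hm : w ∈ List.map Prod.fst t
      · simp [hm, List.mem_cons, hx]
      · simp [hm, List.mem_cons, hw, hx]

lemma cross_sum (d1 d2 : List (String × Int))
    (hnd1 : (d1.map Prod.fst).Nodup) (hnd2 : (d2.map Prod.fst).Nodup) :
    (d1.map (hlk d2)).sum = (d2.map (hmem d1)).sum := by
  induction d2 with
  | nil =>
    have : ∀ p : String × Int, hlk [] p = 0 := fun p => rfl
    simp [List.map_congr_left (fun p _ => this p)]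
  | cons x t ih =>
    obtain ⟨xw, xc⟩ := x
    simp only [List.map_cons, List.nodup_cons] at hnd2
    have hnotin : (PySem.Dict.mk t).get? xw = none := by
      rw [PySem.Dict.get?_eq_none_iff_not_mem_keys]
      simpa using hnd2.1
    have hpt : ∀ p : String × Int,
        hlk ((xw, xc) :: t) p = (if p.1 = xw then xc else 0) + hlk t p := by
      intro p
      simp only [hlk, PySem.Dict.get?_mk_cons]
      by_cases hp : p.1 = xw
      · simp [hp, hnotin]
      · have hne : (xw == p.1) = false := by
          simp [Ne.symm hp]
        simp [hne, hp]
    calc (d1.map (hlk ((xw, xc) :: t))).sum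
        = (d1.map (fun p => (if p.1 = xw then xc else 0) + hlk t p)).sum := by
          congr 1
          exact List.map_congr_left (fun p _ => hpt p)
      _ = (d1.map (fun p => if p.1 = xw then xc else 0)).sum + (d1.map (hlk t)).sum := by
          simp [List.sum_map_add]
      _ = (if xw ∈ d1.map Prod.fst then xc else 0) + (t.map (hmem d1)).sum := by
          rw [sum_indicator d1 xw xc hnd1, ih hnd2.2]
      _ = (((xw, xc) :: t).map (hmem d1)).sum := by
          rw [List.map_cons, List.sum_cons]
          congr 1
          simp only [hmem]
          rcases hg : (PySem.Dict.mk d1).get? xw with _ | c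
          · rw [PySem.Dict.get?_eq_none_iff_not_mem_keys] at hg
            simp only [PySem.Dict.keys] at hg
            simp [hg]
          · have hmemk : xw ∈ d1.map Prod.fst := by
              have := PySem.Dict.mem_keys_of_mem_items (PySem.Dict.mk d1)
                (PySem.Dict.mem_items_of_get?_eq_some (PySem.Dict.mk d1) hg)
              simpa [PySem.Dict.keys] using this
            simp [hmemk]

theorem compareDocs_spec : Claim_equal_compareDocs := by
  intro d1 d2 _ hpre
  obtain ⟨hnd1, hnd2⟩ := hpre
  unfold Spec_compareDocs compareDocs compareDocs_alt
  have eA1 : (fun (acc : Int) (p : String × Int) =>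
      match (PySem.Dict.mk d2).get? p.1 with
      | some c2 => acc + |p.2 - c2|
      | none => acc + p.2) = fun acc p => acc + gA1 d2 p := by
    funext acc p
    simp only [gA1]
    rcases (PySem.Dict.mk d2).get? p.1 <;> rfl
  have eA2 : (fun (acc : Int) (p : String × Int) =>
      match (PySem.Dict.mk d1).get? p.1 with
      | some _ => acc
      | none => acc + p.2) = fun acc p => acc + gA2 d1 p := by
    funext acc p
    simp only [gA2]
    rcases (PySem.Dict.mk d1).get? p.1 <;> simp
  have eB : (fun (acc : Int) (p : String × Int) =>
      match (PySem.Dict.mk d2).get? p.1 with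
      | some c2 => acc + (|p.2 - c2| - p.2 - c2)
      | none => acc) = fun acc p => acc + gB d2 p := by
    funext acc p
    simp only [gB]
    rcases (PySem.Dict.mk d2).get? p.1 <;> simp
  simp only [eA1, eA2, eB, foldl_add_map]
  have split1 : (d1.map (gA1 d2)).sum
      = (d1.map Prod.snd).sum + (d1.map (gB d2)).sum + (d1.map (hlk d2)).sum := by
    have hpt : ∀ p : String × Int,
        gA1 d2 p = p.2 + gB d2 p + hlk d2 p := by
      intro p
      simp only [gA1, gB, hlk]
      rcases (PySem.Dict.mk d2).get? p.1 with _ | c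
      · simp
      · ring
    calc (d1.map (gA1 d2)).sum
        = (d1.map (fun p => p.2 + gB d2 p + hlk d2 p)).sum := by
          congr 1
          exact List.map_congr_left (fun p _ => hpt p)
      _ = (d1.map Prod.snd).sum + (d1.map (gB d2)).sum + (d1.map (hlk d2)).sum := by
          simp [List.sum_map_add]
  have split2 : (d2.map (gA2 d1)).sum + (d2.map (hmem d1)).sum = (d2.map Prod.snd).sum := by
    have hpt : ∀ p : String × Int, gA2 d1 p + hmem d1 p = p.2 := by
      intro p
      simp only [gA2, hmem]
      rcases (PySem.Dict.mk d1).get? p.1 <;> simp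
    calc (d2.map (gA2 d1)).sum + (d2.map (hmem d1)).sum
        = (d2.map (fun p => gA2 d1 p + hmem d1 p)).sum := by
          simp [List.sum_map_add]
      _ = (d2.map Prod.snd).sum := by
          congr 1
          exact List.map_congr_left (fun p _ => hpt p)
  have hcross := cross_sum d1 d2 hnd1 hnd2
  omega
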